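-- pv_equiv track=rewrite | github.com/miaooo0000OOOO/Shanghai-Epidemic-Data-Visualization | tiqu.py | numberIndex
-- ===== SOURCE A (Python) =====
-- numbers = '0123456789'
--
-- def numberIndex(s):
--     firstnumberflag = True
--     fi = -1
--     d = {}
--     for i in range(len(s)):
--         if s[i] in numbers:
--             if firstnumberflag:
--                 fi = i
--                 d[i] = s[i]
--                 firstnumberflag = False
--             else:
--                 d[fi] = d[fi] +s[i]
--         else:
--             firstnumberflag = True
--     return d
-- ===== SOURCE B (Python) =====
-- numbers = '0123456789'
--
-- def numberIndex(s):
--     d = {}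
--     n = len(s)
--     i = 0
--     while i < n:
--         if s[i] in numbers:
--             j = i + 1
--             while j < n and s[j] in numbers:
--                 j += 1
--             d[i] = s[i:j]
--             i = j
--         else:
--             i += 1
--     return d
-- ===== Notes on version B (the rewrite author's own statement) =====
-- stated objective: alternative
-- what changed: Replaces the per-character flag/fi state machine that repeatedly re-concatenates into d[fi] with a two-level scan that finds each maximal digit run at once and stores it with a single slice and a single dict assignment.
import Mathlib
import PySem

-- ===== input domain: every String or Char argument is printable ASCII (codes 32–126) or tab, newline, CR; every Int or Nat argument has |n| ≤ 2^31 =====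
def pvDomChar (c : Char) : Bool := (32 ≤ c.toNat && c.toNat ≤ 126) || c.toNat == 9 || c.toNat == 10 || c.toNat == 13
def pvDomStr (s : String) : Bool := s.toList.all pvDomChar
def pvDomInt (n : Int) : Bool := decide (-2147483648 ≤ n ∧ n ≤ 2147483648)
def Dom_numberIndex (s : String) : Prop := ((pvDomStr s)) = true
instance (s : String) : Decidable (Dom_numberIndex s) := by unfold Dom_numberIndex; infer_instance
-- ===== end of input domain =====

-- B replaces A's per-character flag/fi state machine (which repeatedly re-concatenates into d[fi])
-- by a two-level scan that extracts each maximal digit run at once; return values proved equal on all inputs.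

-- ===== PORT A =====
-- numbers = '0123456789'
def pvNumbers : List Char := "0123456789".toList

-- 's[i] in numbers' (s[i] is one character, so membership of that character)
def pvIsNum (c : Char) : Bool := pvNumbers.contains c

-- dict values carried as List Char (Python string concatenation, done on the list side per the
-- PySem convention; String.ofList is applied on return) — exact on every input
def pvStepA (cs : List Char) (st : Bool × Int × PySem.Dict Int (List Char)) (i : Int) :
    Bool × Int × PySem.Dict Int (List Char) :=
  match PySem.List.pyGet? cs i with
  | none => st        -- unreachable: i is drawn from range(len(s))
  | some c =>
    if pvIsNum c then
      if st.1 then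
        (false, i, (st.2.2).insert i [c])
      else
        -- d[fi] = d[fi] + s[i]; d[fi] always present here, getD default never used
        (st.1, st.2.1, (st.2.2).insert st.2.1 ((st.2.2).getD st.2.1 [] ++ [c]))
    else
      (true, st.2.1, st.2.2)

def numberIndex (s : String) : List (Int × String) :=
  (((PySem.List.pyRange 0 (s.toList.length : Int) 1).foldl (pvStepA s.toList)
      (true, -1, PySem.Dict.empty)).2.2.items).map (fun p => (p.1, String.ofList p.2))

-- ===== PORT B =====
-- outer while: advance index; on a digit, the inner while advances j over the run (takeWhile /
-- dropWhile on the remaining characters), d[i] = s[i:j], continue at j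
def pvRunsB (i : Nat) (t : List Char) : List (Int × String) :=
  match t with
  | [] => []
  | c :: cs =>
    if pvIsNum c then
      ((i : Int), String.ofList (c :: cs.takeWhile pvIsNum)) ::
        pvRunsB (i + (c :: cs.takeWhile pvIsNum).length) (cs.dropWhile pvIsNum)
    else
      pvRunsB (i + 1) cs
termination_by t.length
decreasing_by
  · simpa using Nat.lt_succ_of_le (List.length_dropWhile_le _ _)
  · simp

def numberIndex_alt (s : String) : List (Int × String) := pvRunsB 0 s.toList

-- ===== PRECONDITION & SPEC =====
def Spec_numberIndex (s : String) (out : List (Int × String)) : Prop := out = numberIndex_alt s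
instance (s : String) (out : List (Int × String)) : Decidable (Spec_numberIndex s out) := by unfold Spec_numberIndex; infer_instance

-- ===== CLAIM (what is proved, stated in full; the proofs are below) =====
def Claim_equal_numberIndex : Prop := ∀ (s : String), Dom_numberIndex s → Spec_numberIndex s (numberIndex s)

-- ===== LEMMAS AND PROOFS =====

-- proof-side structural version of A's loop: position p, remaining characters t
def pvStepA' (p : Nat) (c : Char) (st : Bool × Int × PySem.Dict Int (List Char)) :
    Bool × Int × PySem.Dict Int (List Char) :=
  if pvIsNum c then
    if st.1 then
      (false, (p : Int), (st.2.2).insert (p : Int) [c])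
    else
      (st.1, st.2.1, (st.2.2).insert st.2.1 ((st.2.2).getD st.2.1 [] ++ [c]))
  else
    (true, st.2.1, st.2.2)

def pvLoopA : Nat → List Char → (Bool × Int × PySem.Dict Int (List Char)) → (Bool × Int × PySem.Dict Int (List Char))
  | _, [], st => st
  | p, c :: t, st => pvLoopA (p + 1) t (pvStepA' p c st)

-- proof-side runs with List Char values (B's runs before String.ofList)
def pvRunsL (p : Nat) (t : List Char) : List (Int × List Char) :=
  match t with
  | [] => []
  | c :: cs =>
    if pvIsNum c then
      ((p : Int), c :: cs.takeWhile pvIsNum) ::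
        pvRunsL (p + (c :: cs.takeWhile pvIsNum).length) (cs.dropWhile pvIsNum)
    else
      pvRunsL (p + 1) cs
termination_by t.length
decreasing_by
  · simpa using Nat.lt_succ_of_le (List.length_dropWhile_le _ _)
  · simp

-- A's index fold over range(len(s)) is the structural loop over the character suffix
lemma pvBridge : ∀ (t pre : List Char) (st : Bool × Int × PySem.Dict Int (List Char)),
    (PySem.List.pyRange (pre.length : Int) ((pre ++ t).length : Int) 1).foldl (pvStepA (pre ++ t)) st
      = pvLoopA pre.length t st := by
  intro t
  induction t with
  | nil =>
    intro pre st
    rw [PySem.List.pyRange_one_eq_nil (by simp)]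
    simp [pvLoopA]
  | cons c t ih =>
    intro pre st
    have hlt : (pre.length : Int) < ((pre ++ c :: t).length : Int) := by
      simp
    rw [PySem.List.pyRange_one_cons hlt]
    simp only [List.foldl_cons]
    have hstep : pvStepA (pre ++ c :: t) st (pre.length : Int) = pvStepA' pre.length c st := by
      simp [pvStepA, pvStepA']
    rw [hstep]
    have h1 : ((pre.length : Int) + 1) = (((pre ++ [c]).length : Nat) : Int) := by simp
    have h2 : pre ++ c :: t = (pre ++ [c]) ++ t := by simp
    have h3 : (((pre ++ c :: t).length : Nat) : Int) = (((pre ++ [c]) ++ t).length : Int) := by rw [h2]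
    rw [h1, h3, h2, ih (pre ++ [c])]
    simp [pvLoopA]

-- the loop invariant: from a fresh state the dict gains exactly the runs of the suffix;
-- mid-run, the open run at fi is completed with the digit prefix and the rest follows fresh
lemma pvMain : ∀ (t : List Char) (p : Nat) (fi : Int) (d : PySem.Dict Int (List Char)),
    (∀ j : Int, (p : Int) ≤ j → d.contains j = false) →
    ((pvLoopA p t (true, fi, d)).2.2.items = d.items ++ pvRunsL p t
     ∧ ∀ acc : List Char, d.contains fi = false → fi < (p : Int) →
        (pvLoopA p t (false, fi, d.insert fi acc)).2.2.items
          = d.items ++ [(fi, acc ++ t.takeWhile pvIsNum)]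
            ++ pvRunsL (p + (t.takeWhile pvIsNum).length) (t.dropWhile pvIsNum)) := by
  intro t
  induction t with
  | nil =>
    intro p fi d h
    constructor
    · simp [pvLoopA, pvRunsL]
    · intro acc hfi _
      simp [pvLoopA, pvRunsL, PySem.Dict.items_insert_of_not_contains d acc hfi]
  | cons c t ih =>
    intro p fi d h
    have hmono : ∀ j : Int, ((p + 1 : Nat) : Int) ≤ j → d.contains j = false := by
      intro j hj; exact h j (by push_cast at hj ⊢; omega)
    by_cases hc : pvIsNum c = true
    · constructor
      · -- fresh state, digit: a new run starts at p
        have hstep : pvLoopA p (c :: t) (true, fi, d)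
            = pvLoopA (p + 1) t (false, (p : Int), d.insert (p : Int) [c]) := by
          simp [pvLoopA, pvStepA', hc]
        rw [hstep]
        have hrun := (ih (p + 1) (p : Int) d hmono).2 [c] (h (p : Int) le_rfl) (by push_cast; omega)
        rw [hrun, pvRunsL]
        simp only [hc, if_true, List.cons_append]
        have hlen : p + (c :: t.takeWhile pvIsNum).length
            = (p + 1) + (t.takeWhile pvIsNum).length := by simp; omega
        rw [hlen]
        simp
      · -- run state, digit: extend the current run at fi
        intro acc hfi hfil
        have hstep : pvLoopA p (c :: t) (false, fi, d.insert fi acc)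
            = pvLoopA (p + 1) t (false, fi, d.insert fi (acc ++ [c])) := by
          simp [pvLoopA, pvStepA', hc, PySem.Dict.getD_insert_self, PySem.Dict.insert_insert_self]
        rw [hstep]
        have hrun := (ih (p + 1) fi d hmono).2 (acc ++ [c]) hfi (by push_cast at hfil ⊢; omega)
        rw [hrun]
        simp only [List.takeWhile_cons, List.dropWhile_cons, hc, if_true]
        have hlen : p + (c :: t.takeWhile pvIsNum).length
            = (p + 1) + (t.takeWhile pvIsNum).length := by simp; omega
        rw [hlen]
        simp
    · rw [Bool.not_eq_true] at hc
      constructor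
      · -- fresh state, non-digit: skip
        have hstep : pvLoopA p (c :: t) (true, fi, d) = pvLoopA (p + 1) t (true, fi, d) := by
          simp [pvLoopA, pvStepA', hc]
        rw [hstep, (ih (p + 1) fi d hmono).1, pvRunsL]
        simp [hc]
      · -- run state, non-digit: the run at fi is closed
        intro acc hfi hfil
        have hstep : pvLoopA p (c :: t) (false, fi, d.insert fi acc)
            = pvLoopA (p + 1) t (true, fi, d.insert fi acc) := by
          simp [pvLoopA, pvStepA', hc]
        rw [hstep]
        have hmono' : ∀ j : Int, ((p + 1 : Nat) : Int) ≤ j → (d.insert fi acc).contains j = false := by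
          intro j hj
          rw [PySem.Dict.contains_insert]
          have hne : (j == fi) = false := by
            apply beq_false_of_ne; push_cast at hj hfil; omega
          rw [hne, hmono j hj]
          simp
        rw [(ih (p + 1) fi (d.insert fi acc) hmono').1,
          PySem.Dict.items_insert_of_not_contains d acc hfi]
        simp only [List.takeWhile_cons, List.dropWhile_cons, hc, Bool.false_eq_true, if_false]
        rw [pvRunsL]
        simp [hc]

-- B's runs are the proof-side runs with String.ofList applied to each value
lemma pvRunsB_eq : ∀ (n : Nat) (t : List Char) (p : Nat), t.length ≤ n →
    pvRunsB p t = (pvRunsL p t).map (fun q => (q.1, String.ofList q.2)) := by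
  intro n
  induction n with
  | zero =>
    intro t p ht
    have ht0 : t = [] := List.length_eq_zero_iff.mp (Nat.le_zero.mp ht)
    subst ht0; rw [pvRunsB, pvRunsL]; rfl
  | succ n ih =>
    intro t p ht
    match t with
    | [] => rw [pvRunsB, pvRunsL]; rfl
    | c :: cs =>
      rw [pvRunsB, pvRunsL]
      by_cases hc : pvIsNum c = true
      · simp only [hc, if_true, List.map_cons]
        rw [ih _ _ (by
          have := List.length_dropWhile_le pvIsNum cs
          simp at ht; omega)]
      · simp only [hc]
        exact ih _ _ (by simp at ht; omega)

-- ===== VERDICT (by name: the statement is the Claim_ definition above) =====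
theorem numberIndex_spec : Claim_equal_numberIndex := by
  intro s _
  unfold Spec_numberIndex numberIndex numberIndex_alt
  have hb := pvBridge s.toList [] (true, -1, PySem.Dict.empty)
  simp only [List.nil_append, List.length_nil, Nat.cast_zero] at hb
  rw [hb, (pvMain s.toList 0 (-1) PySem.Dict.empty (by intro j _; simp)).1,
    pvRunsB_eq s.toList.length s.toList 0 le_rfl]
  simp [PySem.Dict.empty]
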